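-- pv_equiv track=rewrite | github.com/YeowonKIM/Algorithms | 프로그래머스/Lv.4/64063. 호텔 방 배정/호텔 방 배정.py | solution
-- ===== SOURCE A (Python) =====
-- def solution(k, room_number):
--     answer = []
--     reserved_room = dict()
--
--     def find(room):
--         if room not in reserved_room:
--             reserved_room[room] = room+1
--             return room
--
--         reserved_room[room] = find(reserved_room[room])
--         return reserved_room[room]
--
--     for room in room_number:
--         vacant_room = find(room)
--         answer.append(vacant_room)
--
--     return answer
-- ===== SOURCE B (Python) =====
-- def solution(k, room_number):
--     # B: no union-find dict; keep the set of occupied rooms and scan upward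
--     # from each request to the first free room.
--     taken = set()
--     answer = []
--     for room in room_number:
--         r = room
--         while r in taken:
--             r += 1
--         taken.add(r)
--         answer.append(r)
--     return answer
-- ===== Notes on version B (the rewrite author's own statement) =====
-- stated objective: simpler
-- what changed: Replaced A's recursive union-find dict (path-compressed successor links) with a plain set of occupied rooms and a linear upward scan to the first free room per request; no dict, no recursion.
import Mathlib
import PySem

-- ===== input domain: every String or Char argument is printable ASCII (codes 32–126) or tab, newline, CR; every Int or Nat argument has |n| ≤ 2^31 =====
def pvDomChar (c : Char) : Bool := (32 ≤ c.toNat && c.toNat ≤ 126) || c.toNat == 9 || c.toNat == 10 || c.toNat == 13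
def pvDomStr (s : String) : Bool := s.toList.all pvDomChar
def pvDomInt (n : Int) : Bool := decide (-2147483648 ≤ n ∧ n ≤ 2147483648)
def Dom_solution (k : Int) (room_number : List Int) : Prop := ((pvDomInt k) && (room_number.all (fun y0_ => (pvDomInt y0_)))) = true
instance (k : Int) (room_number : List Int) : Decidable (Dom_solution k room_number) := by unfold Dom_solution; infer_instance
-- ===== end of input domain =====

-- B replaces A's recursive path-compressed successor dict (union-find) by a plain set of
-- occupied rooms with a linear upward scan to the first free room (objective: simpler, not faster).

-- ===== PORT A =====
-- A's recursive `find`: looks up the chain, inserts free room -> free+1 at the base,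
-- and overwrites each visited key with the result while unwinding.  The recursion in
-- Python is on dict values, so the Lean port uses a fuel counter (length+1 always
-- suffices on real runs; on exhaustion the step leaves the state unchanged and
-- records 0 — a totality guard only).
def findA : Nat → PySem.Dict Int Int → Int → Option (Int × PySem.Dict Int Int)
  | 0, _, _ => none
  | fuel+1, d, room =>
    match d.get? room with
    | none => some (room, d.insert room (room + 1))
    | some nxt =>
      match findA fuel d nxt with
      | none => none
      | some (res, d') => some (res, d'.insert room res)

def solution (k : Int) (room_number : List Int) : List Int :=
  (room_number.foldl
    (fun (st : List Int × PySem.Dict Int Int) room =>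
      match findA (room_number.length + 1) st.2 room with
      | none => (st.1 ++ [0], st.2)
      | some (v, d') => (st.1 ++ [v], d'))
    ([], PySem.Dict.empty)).1

-- ===== PORT B =====
-- B's `while r in taken: r += 1` scan; fuel = length+1 always suffices (the set never
-- holds more rooms than requests processed); on exhaustion records 0, as in port A.
def scanB : Nat → PySem.Set Int → Int → Option Int
  | 0, _, _ => none
  | fuel+1, taken, r =>
    if PySem.Set.contains taken r then scanB fuel taken (r + 1) else some r

def solution_alt (k : Int) (room_number : List Int) : List Int :=
  (room_number.foldl
    (fun (st : List Int × PySem.Set Int) room =>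
      match scanB (room_number.length + 1) st.2 room with
      | none => (st.1 ++ [0], st.2)
      | some r => (st.1 ++ [r], PySem.Set.add st.2 r))
    ([], PySem.Set.empty)).1

-- ===== PRECONDITION & SPEC =====
def Spec_solution (k : Int) (room_number : List Int) (out : List Int) : Prop := out = solution_alt k room_number
instance (k : Int) (room_number : List Int) (out : List Int) : Decidable (Spec_solution k room_number out) := by unfold Spec_solution; infer_instance

-- ===== CLAIM (what is proved, stated in full; the proofs are below) =====
def Claim_equal_solution : Prop := ∀ (k : Int) (room_number : List Int), Dom_solution k room_number → Spec_solution k room_number (solution k room_number)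

-- ===== LEMMAS AND PROOFS =====

-- invariant of A's dict: every link points strictly upward and skips only occupied rooms
def DInv (d : PySem.Dict Int Int) : Prop :=
  ∀ x v, d.get? x = some v → x < v ∧ ∀ y, x ≤ y → y < v → d.contains y = true

-- number of keys ≥ r: the fuel measure shared by both ports' termination arguments
def cntD (d : PySem.Dict Int Int) (r : Int) : Nat :=
  (d.keys.filter (fun x => decide (r ≤ x))).length

lemma cntD_le (d : PySem.Dict Int Int) (r : Int) : cntD d r ≤ d.keys.length :=
  List.length_filter_le _ _

lemma cntD_lt (d : PySem.Dict Int Int) (r s : Int) (hrs : r < s)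
    (hr : d.contains r = true) : cntD d s < cntD d r := by
  have hsub : List.Sublist (d.keys.filter (fun x => decide (s ≤ x))) (d.keys.filter (fun x => decide (r ≤ x))) := by
    apply List.monotone_filter_right
    intro x hx
    simp only [decide_eq_true_eq] at *
    omega
  have hle := hsub.length_le
  rcases lt_or_eq_of_le hle with h | h
  · exact h
  · exfalso
    have heq := hsub.eq_of_length h
    have hrmem : r ∈ d.keys.filter (fun x => decide (r ≤ x)) := by
      rw [List.mem_filter]
      exact ⟨(PySem.Dict.contains_iff_mem_keys d r).mp hr, by simp⟩
    rw [← heq, List.mem_filter] at hrmem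
    have := hrmem.2
    simp only [decide_eq_true_eq] at this
    omega

lemma free_unique (d : PySem.Dict Int Int) (r f1 f2 : Int)
    (h1 : r ≤ f1) (h2 : r ≤ f2) (hf1 : d.contains f1 = false) (hf2 : d.contains f2 = false)
    (hi1 : ∀ y, r ≤ y → y < f1 → d.contains y = true)
    (hi2 : ∀ y, r ≤ y → y < f2 → d.contains y = true) : f1 = f2 := by
  rcases lt_trichotomy f1 f2 with h | h | h
  · have := hi2 f1 h1 h
    rw [hf1] at this; exact absurd this (by simp)
  · exact h
  · have := hi1 f2 h2 h
    rw [hf2] at this; exact absurd this (by simp)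

lemma findA_spec : ∀ (fuel : Nat) (d : PySem.Dict Int Int) (r : Int),
    DInv d → d.keys.Nodup → cntD d r < fuel →
    ∃ f d', findA fuel d r = some (f, d') ∧ r ≤ f ∧ d.contains f = false ∧
      (∀ y, r ≤ y → y < f → d.contains y = true) ∧
      DInv d' ∧ d'.keys.Nodup ∧ ∀ x, d'.contains x = (d.contains x || (x == f)) := by
  intro fuel
  induction fuel with
  | zero => intro d r _ _ h; omega
  | succ fuel ih =>
    intro d r hinv hnd hcnt
    cases hg : d.get? r with
    | none =>
      refine ⟨r, d.insert r (r + 1), ?_, le_refl r, ?_, ?_, ?_, ?_, ?_⟩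
      · simp [findA, hg]
      · rw [PySem.Dict.contains_eq_isSome_get?, hg]; rfl
      · intro y hy hy'; omega
      · intro x v hx
        by_cases hxr : x = r
        · subst hxr
          rw [PySem.Dict.get?_insert_self] at hx
          have hv : v = x + 1 := by injection hx with h; omega
          subst hv
          refine ⟨by omega, ?_⟩
          intro y hy hy'
          have : y = x := by omega
          subst this
          simp
        · rw [PySem.Dict.get?_insert_of_ne _ _ hxr] at hx
          obtain ⟨hlt, hint⟩ := hinv x v hx
          refine ⟨hlt, fun y hy hy' => ?_⟩
          simp [PySem.Dict.contains_insert, hint y hy hy']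
      · exact PySem.Dict.nodup_keys_insert _ _ _ hnd
      · intro x
        rw [PySem.Dict.contains_insert, Bool.or_comm]
    | some v =>
      have hrc : d.contains r = true := by
        rw [PySem.Dict.contains_eq_isSome_get?, hg]; rfl
      obtain ⟨hrv, hint⟩ := hinv r v hg
      have hlt := cntD_lt d r v hrv hrc
      obtain ⟨f, d1, heq1, hvf, hfree, hint1, hinv1, hnd1, hc1⟩ :=
        ih d v hinv hnd (by omega)
      refine ⟨f, d1.insert r f, ?_, by omega, hfree, ?_, ?_, ?_, ?_⟩
      · simp [findA, hg, heq1]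
      · intro y hy hy'
        by_cases hyv : y < v
        · exact hint y hy hyv
        · exact hint1 y (by omega) hy'
      · intro x w hx
        by_cases hxr : x = r
        · subst hxr
          rw [PySem.Dict.get?_insert_self] at hx
          obtain rfl : f = w := by injection hx
          refine ⟨by omega, fun y hy hy' => ?_⟩
          have hyd : d.contains y = true := by
            by_cases hyv : y < v
            · exact hint y hy hyv
            · exact hint1 y (by omega) hy'
          have : d1.contains y = true := by rw [hc1, hyd]; rfl
          simp [PySem.Dict.contains_insert, this]
        · rw [PySem.Dict.get?_insert_of_ne _ _ hxr] at hx
          obtain ⟨hlt', hint'⟩ := hinv1 x w hx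
          refine ⟨hlt', fun y hy hy' => ?_⟩
          simp [PySem.Dict.contains_insert, hint' y hy hy']
      · exact PySem.Dict.nodup_keys_insert _ _ _ hnd1
      · intro x
        rw [PySem.Dict.contains_insert, hc1 x]
        by_cases hxr : x = r
        · subst hxr; simp [hrc]
        · simp [hxr]

lemma scanB_spec : ∀ (fuel : Nat) (d : PySem.Dict Int Int) (taken : PySem.Set Int) (r : Int),
    (∀ x, PySem.Set.contains taken x = d.contains x) → cntD d r < fuel →
    ∃ f, scanB fuel taken r = some f ∧ r ≤ f ∧ d.contains f = false ∧
      ∀ y, r ≤ y → y < f → d.contains y = true := by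
  intro fuel
  induction fuel with
  | zero => intro d taken r _ h; omega
  | succ fuel ih =>
    intro d taken r hsame hcnt
    by_cases hc : PySem.Set.contains taken r = true
    · have hdc : d.contains r = true := by rw [← hsame]; exact hc
      have hlt := cntD_lt d r (r + 1) (by omega) hdc
      obtain ⟨f, heq, hrf, hfree, hintv⟩ := ih d taken (r + 1) hsame (by omega)
      refine ⟨f, ?_, by omega, hfree, ?_⟩
      · simp only [scanB]; rw [if_pos hc]; exact heq
      · intro y hy hy'
        by_cases hyr : y = r
        · subst hyr; exact hdc
        · exact hintv y (by omega) hy'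
    · refine ⟨r, ?_, le_refl r, ?_, fun y hy hy' => by omega⟩
      · simp only [scanB]; rw [if_neg hc]
      · rw [← hsame]
        exact Bool.eq_false_iff.mpr (fun h => hc h)

lemma keys_len_succ (d d' : PySem.Dict Int Int) (f : Int)
    (hnd : d.keys.Nodup) (hnd' : d'.keys.Nodup)
    (hf : d.contains f = false)
    (hc : ∀ x, d'.contains x = (d.contains x || (x == f))) :
    d'.keys.length = d.keys.length + 1 := by
  have hperm : d'.keys.Perm (f :: d.keys) := by
    rw [List.perm_ext_iff_of_nodup hnd' ?_]
    · intro a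
      have h1 := hc a
      constructor
      · intro ha
        have : d'.contains a = true := (PySem.Dict.contains_iff_mem_keys d' a).mpr ha
        rw [h1] at this
        rcases Bool.or_eq_true_iff.mp this with h | h
        · exact List.mem_cons_of_mem _ ((PySem.Dict.contains_iff_mem_keys d a).mp h)
        · have : a = f := by simpa using h
          subst this; exact List.mem_cons_self
      · intro ha
        apply (PySem.Dict.contains_iff_mem_keys d' a).mp
        rw [h1]
        rcases List.mem_cons.mp ha with h | h
        · subst h; simp
        · rw [(PySem.Dict.contains_iff_mem_keys d a).mpr h]; rfl
    · refine List.nodup_cons.mpr ⟨?_, hnd⟩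
      intro hmem
      have := (PySem.Dict.contains_iff_mem_keys d f).mpr hmem
      rw [hf] at this; exact absurd this (by simp)
  rw [hperm.length_eq, List.length_cons]

lemma set_contains_add (s : PySem.Set Int) (x y : Int) :
    PySem.Set.contains (PySem.Set.add s x) y = (PySem.Set.contains s y || (y == x)) := by
  by_cases h : y ∈ PySem.Set.add s x
  · rw [(PySem.Set.contains_iff _ _).mpr h]
    rcases (PySem.Set.mem_add _ _ _).mp h with h' | h'
    · rw [(PySem.Set.contains_iff _ _).mpr h']; rfl
    · subst h'; simp
  · rw [Bool.eq_false_iff.mpr (fun hc => h ((PySem.Set.contains_iff _ _).mp hc))]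
    rw [PySem.Set.mem_add _ _ _] at h
    have h1 : y ∉ s := fun hm => h (Or.inl hm)
    have h2 : y ≠ x := fun he => h (Or.inr he)
    rw [Bool.eq_false_iff.mpr (fun hc => h1 ((PySem.Set.contains_iff _ _).mp hc))]
    simp [h2]

lemma loop_eq : ∀ (rooms : List Int) (F : Nat) (ans : List Int)
    (d : PySem.Dict Int Int) (taken : PySem.Set Int),
    DInv d → d.keys.Nodup → (∀ x, PySem.Set.contains taken x = d.contains x) →
    d.keys.length + rooms.length ≤ F →
    (rooms.foldl (fun (st : List Int × PySem.Dict Int Int) room =>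
        match findA F st.2 room with
        | none => (st.1 ++ [0], st.2)
        | some (v, d') => (st.1 ++ [v], d')) (ans, d)).1
    = (rooms.foldl (fun (st : List Int × PySem.Set Int) room =>
        match scanB F st.2 room with
        | none => (st.1 ++ [0], st.2)
        | some r => (st.1 ++ [r], PySem.Set.add st.2 r)) (ans, taken)).1 := by
  intro rooms
  induction rooms with
  | nil => intro F ans d taken _ _ _ _; rfl
  | cons room rest ih =>
    intro F ans d taken hinv hnd hsame hF
    have hcnt : cntD d room < F := by
      have h1 := cntD_le d room
      simp only [List.length_cons] at hF
      omega
    obtain ⟨f, d', heqA, hrf, hfree, hintv, hinv', hnd', hc'⟩ :=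
      findA_spec F d room hinv hnd hcnt
    obtain ⟨f2, heqB, hrf2, hfree2, hintv2⟩ := scanB_spec F d taken room hsame hcnt
    have hf12 : f2 = f := free_unique d room f2 f hrf2 hrf hfree2 hfree hintv2 hintv
    subst hf12
    simp only [List.foldl_cons, heqA, heqB]
    apply ih F (ans ++ [f2]) d' (PySem.Set.add taken f2) hinv' hnd'
    · intro x
      rw [set_contains_add, hsame x, hc' x]
    · have := keys_len_succ d d' f2 hnd hnd' hfree hc'
      simp only [List.length_cons] at hF
      omega

lemma inv_empty : DInv PySem.Dict.empty := by
  intro x v hx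
  rw [PySem.Dict.get?_empty] at hx
  exact absurd hx (by simp)

-- ===== VERDICT (by name: the statement is the Claim_ definition above) =====
theorem solution_spec : Claim_equal_solution := by
  intro k room_number _
  unfold Spec_solution solution solution_alt
  exact loop_eq room_number (room_number.length + 1) [] PySem.Dict.empty PySem.Set.empty
    inv_empty (by simp [PySem.Dict.keys_empty]) (fun x => by simp [PySem.Dict.contains_empty])
    (by simp [PySem.Dict.keys_empty])
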